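-- pv_equiv track=rewrite | github.com/develone/yocto-zeus-icestorm | icefuzz/tests/rgba_drv_cbit/fuzz_rgba_drv_cbit.py | get_param_value
-- ===== SOURCE A (Python) =====
-- def get_param_value(param_name, param_size, fuzz_bit):
--     param = "\"0b";
--     #In the RGB driver, once bit i of a current parameter is set i-1..0 must also be set
--     is_high = False
--     for i in range(param_size - 1, -1, -1):
--         if fuzz_bit == param_name + "_" + str(i) or (i == 0 and fuzz_bit == "CURRENT_MODE") or is_high:
--             param += '1'
--             is_high = True
--         else:
--             param += '0'
--     param += "\""
--     return param
-- ===== SOURCE B (Python) =====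
-- def get_param_value(param_name, param_size, fuzz_bit):
--     # find the trigger bit: the highest i whose name matches fuzz_bit
--     t = -1
--     for i in range(param_size - 1, -1, -1):
--         if fuzz_bit == param_name + "_" + str(i):
--             t = i
--             break
--     if t < 0 and fuzz_bit == "CURRENT_MODE" and param_size >= 1:
--         t = 0
--     if t >= 0:
--         body = '0' * (param_size - 1 - t) + '1' * (t + 1)
--     else:
--         body = '0' * param_size
--     return '"0b' + body + '"'
-- ===== Notes on version B (the rewrite author's own statement) =====
-- stated objective: simpler
-- what changed: Instead of A's per-character pass with a sticky is_high flag, B locates the trigger bit index (highest matching bit, with the CURRENT_MODE fallback) and builds the whole body at once by string repetition '0'*(size-1-t) + '1'*(t+1).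
import Mathlib
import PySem

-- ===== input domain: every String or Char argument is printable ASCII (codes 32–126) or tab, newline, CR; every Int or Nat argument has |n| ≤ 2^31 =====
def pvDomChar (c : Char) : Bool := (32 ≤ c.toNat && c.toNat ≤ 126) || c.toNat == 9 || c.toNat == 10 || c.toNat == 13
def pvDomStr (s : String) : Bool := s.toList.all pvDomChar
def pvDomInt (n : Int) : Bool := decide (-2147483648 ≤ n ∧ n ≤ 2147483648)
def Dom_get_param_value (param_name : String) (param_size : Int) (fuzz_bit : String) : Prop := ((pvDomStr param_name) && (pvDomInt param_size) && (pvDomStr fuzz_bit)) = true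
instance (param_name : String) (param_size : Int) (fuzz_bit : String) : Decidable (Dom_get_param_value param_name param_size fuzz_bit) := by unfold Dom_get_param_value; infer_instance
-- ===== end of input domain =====

-- B replaces A's per-character sticky-flag pass by: find the trigger bit index, then build the body by repetition ('0'*(size-1-t) + '1'*(t+1)); same result, simpler construction.

-- ===== PORT A =====
def get_param_value (param_name : String) (param_size : Int) (fuzz_bit : String) : String :=
  let st := (PySem.List.pyRange (param_size - 1) (-1) (-1)).foldl
    (fun (st : List Char × Bool) i =>
      if (fuzz_bit == param_name ++ "_" ++ PySem.Int.toStr i) || ((i == 0) && (fuzz_bit == "CURRENT_MODE")) || st.2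
      then (st.1 ++ ['1'], true) else (st.1 ++ ['0'], false))
    ("\"0b".toList, false)
  String.ofList (st.1 ++ ['"'])

-- ===== PORT B =====
-- B-side helper: the 'for … if …: t = i; break' search loop of Source B
def pyFindBreak (p : Int → Bool) : List Int → Int
  | [] => -1
  | i :: rest => if p i then i else pyFindBreak p rest

def get_param_value_alt (param_name : String) (param_size : Int) (fuzz_bit : String) : String :=
  let t0 := pyFindBreak (fun i => fuzz_bit == param_name ++ "_" ++ PySem.Int.toStr i)
              (PySem.List.pyRange (param_size - 1) (-1) (-1))
  let t := if decide (t0 < 0) && (fuzz_bit == "CURRENT_MODE") && decide (1 ≤ param_size) then 0 else t0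
  let body := if 0 ≤ t then
      List.replicate (param_size - 1 - t).toNat '0' ++ List.replicate (t + 1).toNat '1'
    else List.replicate param_size.toNat '0'
  String.ofList ("\"0b".toList ++ body ++ ['"'])

-- ===== PRECONDITION & SPEC =====
def Spec_get_param_value (param_name : String) (param_size : Int) (fuzz_bit : String) (out : String) : Prop := out = get_param_value_alt param_name param_size fuzz_bit
instance (param_name : String) (param_size : Int) (fuzz_bit : String) (out : String) : Decidable (Spec_get_param_value param_name param_size fuzz_bit out) := by unfold Spec_get_param_value; infer_instance

-- ===== CLAIM (what is proved, stated in full; the proofs are below) =====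
def Claim_equal_get_param_value : Prop := ∀ (param_name : String) (param_size : Int) (fuzz_bit : String), Dom_get_param_value param_name param_size fuzz_bit → Spec_get_param_value param_name param_size fuzz_bit (get_param_value param_name param_size fuzz_bit)

-- ===== LEMMAS AND PROOFS =====

-- A's loop body, with the whole trigger condition abstracted as p
def stepG (p : Int → Bool) (st : List Char × Bool) (i : Int) : List Char × Bool :=
  if p i || st.2 then (st.1 ++ ['1'], true) else (st.1 ++ ['0'], false)

theorem fold_ones (p : Int → Bool) : ∀ (l : List Int) (s : List Char),
    l.foldl (stepG p) (s, true) = (s ++ List.replicate l.length '1', true) := by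
  intro l
  induction l with
  | nil => intro s; simp
  | cons x xs ih =>
    intro s
    simp [stepG, ih (s ++ ['1']), List.replicate_succ]

theorem findBreak_bound (p : Int → Bool) : ∀ n : Nat,
    pyFindBreak p (PySem.List.pyRange ((n:Int) - 1) (-1) (-1)) = -1 ∨
    (0 ≤ pyFindBreak p (PySem.List.pyRange ((n:Int) - 1) (-1) (-1)) ∧
     pyFindBreak p (PySem.List.pyRange ((n:Int) - 1) (-1) (-1)) < (n:Int)) := by
  intro n
  induction n with
  | zero => left; rw [PySem.List.pyRange_neg_one_eq_nil (by omega)]; rfl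
  | succ m ih =>
    rw [show ((m+1:Nat):Int) - 1 = (m:Int) by push_cast; ring,
        PySem.List.pyRange_neg_one_cons (by omega)]
    by_cases h : p (m:Int) = true
    · right
      simp only [pyFindBreak, h, if_true]
      push_cast
      omega
    · have h' : p (m:Int) = false := by rwa [Bool.not_eq_true] at h
      simp only [pyFindBreak, h', Bool.false_eq_true, if_false]
      rcases ih with h1 | h1
      · left; exact h1
      · right; push_cast; omega

theorem fold_char (p : Int → Bool) : ∀ (n : Nat) (s : List Char),
    (PySem.List.pyRange ((n:Int) - 1) (-1) (-1)).foldl (stepG p) (s, false)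
    = (s ++ (if 0 ≤ pyFindBreak p (PySem.List.pyRange ((n:Int) - 1) (-1) (-1)) then
          List.replicate ((n:Int) - 1 - pyFindBreak p (PySem.List.pyRange ((n:Int) - 1) (-1) (-1))).toNat '0'
            ++ List.replicate (pyFindBreak p (PySem.List.pyRange ((n:Int) - 1) (-1) (-1)) + 1).toNat '1'
        else List.replicate n '0'),
       decide (0 ≤ pyFindBreak p (PySem.List.pyRange ((n:Int) - 1) (-1) (-1)))) := by
  intro n
  induction n with
  | zero =>
    intro s
    rw [PySem.List.pyRange_neg_one_eq_nil (by omega)]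
    simp [pyFindBreak]
  | succ m ih =>
    intro s
    rw [show ((m+1:Nat):Int) - 1 = (m:Int) by push_cast; ring,
        PySem.List.pyRange_neg_one_cons (by omega)]
    by_cases h : p (m:Int) = true
    · simp only [List.foldl_cons, stepG, h, Bool.true_or, if_true]
      rw [fold_ones p _ (s ++ ['1'])]
      have hl : (PySem.List.pyRange ((m:Int) - 1) (-1) (-1)).length = m := by
        rw [PySem.List.length_pyRange_neg_one]; omega
      simp only [pyFindBreak, h, if_true]
      have h0 : (0:Int) ≤ (m:Int) := by omega
      rw [if_pos h0, hl]
      have : ((m:Int) + 1).toNat = m + 1 := by omega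
      simp [this, List.replicate_succ]
    · simp only [List.foldl_cons, stepG, h, Bool.false_eq_true, if_false, Bool.false_or,
        Bool.false_and, Bool.or_false]
      rw [ih (s ++ ['0'])]
      simp only [pyFindBreak, h, Bool.false_eq_true, if_false]
      rcases findBreak_bound p m with hb | hb
      · rw [hb]
        simp [List.replicate_succ]
      · set t := pyFindBreak p (PySem.List.pyRange ((m:Int) - 1) (-1) (-1)) with ht
        rw [if_pos hb.1, if_pos hb.1]
        have h1 : ((m:Int) - t).toNat = ((m:Int) - 1 - t).toNat + 1 := by omega
        rw [h1]
        simp [List.replicate_succ]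

theorem find_rel (q : Int → Bool) (cm : Bool) : ∀ n : Nat,
    pyFindBreak (fun i => q i || ((i == 0) && cm)) (PySem.List.pyRange ((n:Int) - 1) (-1) (-1))
    = (if 0 ≤ pyFindBreak q (PySem.List.pyRange ((n:Int) - 1) (-1) (-1)) then
         pyFindBreak q (PySem.List.pyRange ((n:Int) - 1) (-1) (-1))
       else if cm && decide (1 ≤ (n:Int)) then 0 else -1) := by
  intro n
  induction n with
  | zero =>
    rw [PySem.List.pyRange_neg_one_eq_nil (by omega)]
    simp [pyFindBreak]
  | succ m ih =>
    rw [show ((m+1:Nat):Int) - 1 = (m:Int) by push_cast; ring,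
        PySem.List.pyRange_neg_one_cons (by omega)]
    by_cases hq : q (m:Int) = true
    · simp only [pyFindBreak, hq, Bool.true_or, if_true]
      rw [if_pos (by omega)]
    · simp only [pyFindBreak, hq, Bool.false_eq_true, if_false, Bool.false_or]
      by_cases hm : m = 0
      · subst hm
        simp only [Nat.cast_zero]
        rw [PySem.List.pyRange_neg_one_eq_nil (a := (0:Int) - 1) (by omega)]
        by_cases hc : cm = true
        · simp [pyFindBreak, hc]
        · simp [pyFindBreak, hc]
      · have hne : ((m:Int) == 0) = false := by
          simp only [beq_eq_false_iff_ne, ne_eq, Nat.cast_eq_zero]; exact hm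
        have hq' : q (m:Int) = false := by rwa [Bool.not_eq_true] at hq
        simp only [pyFindBreak, hq', Bool.false_eq_true, if_false, hne, Bool.false_and,
          Bool.or_false]
        rw [ih]
        have h1 : decide (1 ≤ (m:Int)) = true := by simp; omega
        have h2 : decide (1 ≤ ((m+1:Nat):Int)) = true := by simp
        rw [h1, h2]

-- ===== VERDICT (by name: the statement is the Claim_ definition above) =====
theorem get_param_value_spec : Claim_equal_get_param_value := by
  intro pn ps fb _
  show String.ofList
      ((((PySem.List.pyRange (ps - 1) (-1) (-1)).foldl
        (stepG (fun i => (fb == pn ++ "_" ++ PySem.Int.toStr i) || ((i == 0) && (fb == "CURRENT_MODE"))))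
        ("\"0b".toList, false)).1 ++ ['\"']))
    = String.ofList ("\"0b".toList ++
        (if 0 ≤ (if decide ((pyFindBreak (fun i => fb == pn ++ "_" ++ PySem.Int.toStr i) (PySem.List.pyRange (ps - 1) (-1) (-1))) < 0) && (fb == "CURRENT_MODE") && decide (1 ≤ ps) then 0 else (pyFindBreak (fun i => fb == pn ++ "_" ++ PySem.Int.toStr i) (PySem.List.pyRange (ps - 1) (-1) (-1)))) then
           List.replicate (ps - 1 - (if decide ((pyFindBreak (fun i => fb == pn ++ "_" ++ PySem.Int.toStr i) (PySem.List.pyRange (ps - 1) (-1) (-1))) < 0) && (fb == "CURRENT_MODE") && decide (1 ≤ ps) then 0 else (pyFindBreak (fun i => fb == pn ++ "_" ++ PySem.Int.toStr i) (PySem.List.pyRange (ps - 1) (-1) (-1))))).toNat '0'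
             ++ List.replicate ((if decide ((pyFindBreak (fun i => fb == pn ++ "_" ++ PySem.Int.toStr i) (PySem.List.pyRange (ps - 1) (-1) (-1))) < 0) && (fb == "CURRENT_MODE") && decide (1 ≤ ps) then 0 else (pyFindBreak (fun i => fb == pn ++ "_" ++ PySem.Int.toStr i) (PySem.List.pyRange (ps - 1) (-1) (-1)))) + 1).toNat '1'
         else List.replicate ps.toNat '0') ++ ['\"'])
  by_cases hle : ps ≤ 0
  · have hnil : PySem.List.pyRange (ps - 1) (-1) (-1) = [] :=
      PySem.List.pyRange_neg_one_eq_nil (by omega)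
    have h0 : ps.toNat = 0 := by omega
    have hd : decide (1 ≤ ps) = false := by simp; omega
    simp [hnil, pyFindBreak, hd, h0]
  · obtain ⟨n, hn⟩ : ∃ n : Nat, ps = (n:Int) := ⟨ps.toNat, by omega⟩
    subst hn
    rw [fold_char, find_rel]
    rcases findBreak_bound (fun i => fb == pn ++ "_" ++ PySem.Int.toStr i) n with hb | hb
    · simp [hb]
    · have hd : decide ((pyFindBreak (fun i => fb == pn ++ "_" ++ PySem.Int.toStr i)
          (PySem.List.pyRange ((n:Int) - 1) (-1) (-1))) < 0) = false := by
        simp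
        omega
      rw [hd]
      simp only [Bool.false_and, Bool.false_eq_true, if_false]
      rw [if_pos hb.1, if_pos hb.1, if_pos hb.1]
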